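-- pv_equiv track=rewrite | github.com/carterjbastian/aoc-2022 | problems/day_18.py | get_surface_area
-- ===== SOURCE A (Python) =====
-- def get_surface_area(arr, max_val):
--     surface_area = 0
--     # Go in X horizontal for every Z and Y layer, looking for changes
--     for z in range(0, max_val + 1):
--         for y in range(0, max_val + 1):
--             for x in range(1, max_val + 1):
--                 if arr[z][y][x] ^ arr[z][y][x - 1]:
--                     surface_area += 1
--
--     # Go in Y horizontal for every Z and X layer, looking for changes
--     for z in range(0, max_val + 1):
--         for x in range(0, max_val + 1):
--             for y in range(1, max_val + 1):
--                 if arr[z][y][x] ^ arr[z][y - 1][x]: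
--                     surface_area += 1
--
--     # Go in Z horizontal for every Y and X layer, looking for changes
--     for y in range(0, max_val + 1):
--         for x in range(0, max_val + 1):
--             for z in range(1, max_val + 1):
--                 if arr[z][y][x] ^ arr[z - 1][y][x]:
--                     surface_area += 1
--
--     return surface_area
-- ===== SOURCE B (Python) =====
-- def get_surface_area(arr, max_val):
--     # Run-length view: along every axis-aligned line of the (max_val+1)-cube,
--     # the number of faces is (number of maximal runs of equal values) - 1.
--     if max_val <= 0:
--         return 0
--     n = max_val + 1
--     cube = [[[arr[z][y][x] for x in range(n)] for y in range(n)] for z in range(n)]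
--     lines = []
--     for plane in cube:
--         lines.extend(plane)                       # x-lines
--         lines.extend(zip(*plane))                 # y-lines (columns of the plane)
--     for stack in zip(*cube):                      # rows at a fixed y, across z
--         lines.extend(zip(*stack))                 # z-pillars at fixed (y, x)
--
--     def transitions(line):
--         runs = []
--         for v in line:
--             if not runs or runs[-1] != v:
--                 runs.append(v)
--         return len(runs) - 1
--
--     return sum(transitions(line) for line in lines)
-- ===== Notes on version B (the rewrite author's own statement) =====
-- stated objective: alternative
-- what changed: B reformulates the count as run-length encoding: it extracts the (max_val+1)-window cube, materialises all 3*(max_val+1)^2 axis-aligned lines via zip-transposes, and for each line adds (number of maximal runs of equal values) - 1, instead of A's three index-driven triple-loop scans testing xor of adjacent cells.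
import Mathlib
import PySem

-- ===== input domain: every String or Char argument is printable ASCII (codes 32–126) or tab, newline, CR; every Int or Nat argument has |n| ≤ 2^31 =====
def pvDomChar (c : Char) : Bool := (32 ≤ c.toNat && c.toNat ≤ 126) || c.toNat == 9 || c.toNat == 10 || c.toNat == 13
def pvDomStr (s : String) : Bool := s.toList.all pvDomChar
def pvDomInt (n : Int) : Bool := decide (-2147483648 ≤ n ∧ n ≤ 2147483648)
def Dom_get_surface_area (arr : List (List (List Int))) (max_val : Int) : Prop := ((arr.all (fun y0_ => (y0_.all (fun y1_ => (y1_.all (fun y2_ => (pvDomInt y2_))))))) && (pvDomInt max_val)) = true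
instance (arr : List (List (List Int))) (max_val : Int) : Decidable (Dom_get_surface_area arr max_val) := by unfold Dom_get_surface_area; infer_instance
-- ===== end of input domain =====

-- B recasts the count as run-length encoding: it extracts the (max_val+1)-window cube,
-- builds every axis-aligned line via zip-transposes, and adds (runs - 1) per line,
-- instead of A's three index-driven triple-loop scans; objective: alternative (same cost).

-- ===== PORT A =====
-- arr[z][y][x] (indices are in range on every admitted input; Pre_ excludes IndexError)
def pvCell (arr : List (List (List Int))) (z y x : Int) : Int :=
  PySem.List.pyGetD (PySem.List.pyGetD (PySem.List.pyGetD arr z []) y []) x 0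

def get_surface_area (arr : List (List (List Int))) (max_val : Int) : Int :=
  let s1 := (PySem.List.pyRange 0 (max_val + 1) 1).foldl (fun s z =>
    (PySem.List.pyRange 0 (max_val + 1) 1).foldl (fun s y =>
      (PySem.List.pyRange 1 (max_val + 1) 1).foldl (fun s x =>
        if PySem.Int.bxor (pvCell arr z y x) (pvCell arr z y (x - 1)) ≠ 0 then s + 1 else s) s) s) 0
  let s2 := (PySem.List.pyRange 0 (max_val + 1) 1).foldl (fun s z =>
    (PySem.List.pyRange 0 (max_val + 1) 1).foldl (fun s x =>
      (PySem.List.pyRange 1 (max_val + 1) 1).foldl (fun s y =>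
        if PySem.Int.bxor (pvCell arr z y x) (pvCell arr z (y - 1) x) ≠ 0 then s + 1 else s) s) s) s1
  (PySem.List.pyRange 0 (max_val + 1) 1).foldl (fun s y =>
    (PySem.List.pyRange 0 (max_val + 1) 1).foldl (fun s x =>
      (PySem.List.pyRange 1 (max_val + 1) 1).foldl (fun s z =>
        if PySem.Int.bxor (pvCell arr z y x) (pvCell arr (z - 1) y x) ≠ 0 then s + 1 else s) s) s) s2

-- ===== PORT B =====
-- zip(*ls): stop at the first exhausted list; fuel = length of the first list suffices
def pvZipNAux {α : Type} [Inhabited α] : Nat → List (List α) → List (List α)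
  | 0, _ => []
  | n + 1, ls =>
    if ls.any (·.isEmpty) then []
    else (ls.map (·.headD default)) :: pvZipNAux n (ls.map (·.tail))

def pvZipN {α : Type} [Inhabited α] (ls : List (List α)) : List (List α) :=
  match ls with
  | [] => []
  | l :: t => pvZipNAux l.length (l :: t)

-- the 'runs' list built by transitions' loop (runs[-1] = getLast?)
def pvCompress (line : List Int) : List Int :=
  line.foldl (fun runs v => if runs.isEmpty ∨ runs.getLast? ≠ some v then runs ++ [v] else runs) []

def pvTrans (line : List Int) : Int := ((pvCompress line).length : Int) - 1

def get_surface_area_alt (arr : List (List (List Int))) (max_val : Int) : Int :=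
  if max_val ≤ 0 then 0
  else
    let n : Int := max_val + 1
    let cube := (PySem.List.pyRange 0 n 1).map (fun z =>
      (PySem.List.pyRange 0 n 1).map (fun y =>
        (PySem.List.pyRange 0 n 1).map (fun x => pvCell arr z y x)))
    let lines1 := cube.foldl (fun acc plane => (acc ++ plane) ++ pvZipN plane) ([] : List (List Int))
    let lines := (pvZipN cube).foldl (fun acc stack => acc ++ pvZipN stack) lines1
    (lines.map pvTrans).sum

-- ===== PRECONDITION & SPEC =====
-- Pre_ excludes exactly the inputs where the Python A raises IndexError: whenever
-- max_val ≥ 1 the grid must contain a plane/row/cell at every coordinate ≤ max_val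
-- (for max_val ≤ 0 A reads no element and returns 0 on any arr).
def Pre_get_surface_area (arr : List (List (List Int))) (max_val : Int) : Prop :=
  max_val ≤ 0 ∨
    (max_val < (arr.length : Int) ∧
      ∀ plane ∈ arr.take (max_val + 1).toNat,
        max_val < (plane.length : Int) ∧
          ∀ row ∈ plane.take (max_val + 1).toNat, max_val < (row.length : Int))
instance (arr : List (List (List Int))) (max_val : Int) : Decidable (Pre_get_surface_area arr max_val) := by
  unfold Pre_get_surface_area; infer_instance

def pvWitness_get_surface_area : List (List (List Int)) × Int :=
  ([[[1, 0], [0, 0]], [[0, 0], [0, 1]]], 1)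

def Spec_get_surface_area (arr : List (List (List Int))) (max_val : Int) (out : Int) : Prop := out = get_surface_area_alt arr max_val
instance (arr : List (List (List Int))) (max_val : Int) (out : Int) : Decidable (Spec_get_surface_area arr max_val out) := by unfold Spec_get_surface_area; infer_instance

-- ===== CLAIM (what is proved, stated in full; the proofs are below) =====
def Claim_equal_get_surface_area : Prop := ∀ (arr : List (List (List Int))) (max_val : Int), Dom_get_surface_area arr max_val → Pre_get_surface_area arr max_val → Spec_get_surface_area arr max_val (get_surface_area arr max_val)


-- ===== LEMMAS AND PROOFS =====

-- indicator of a value change, the cell at Nat coordinates, change count along a line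
def pvInd (a b : Int) : Int := if a ≠ b then 1 else 0

def pvE (arr : List (List (List Int))) (z y x : Nat) : Int :=
  ((arr.getD z []).getD y []).getD x 0

def pvCnt : Int → List Int → Int
  | _, [] => 0
  | p, v :: t => (if v ≠ p then 1 else 0) + pvCnt v t

theorem pv_bxor_eq_zero (a b : Int) : PySem.Int.bxor a b = 0 ↔ a = b := by
  unfold PySem.Int.bxor
  split_ifs with h1 h2 h2 <;> constructor <;> intro h <;> try omega
  · have : a.toNat ^^^ b.toNat = 0 := by exact_mod_cast h
    have := Nat.xor_eq_zero_iff.mp this; omega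
  · have : a.toNat = b.toNat := by omega
    simp [this]
  · have : (-a - 1).toNat ^^^ (-b - 1).toNat = 0 := by exact_mod_cast h
    have := Nat.xor_eq_zero_iff.mp this; omega
  · have : (-a - 1).toNat = (-b - 1).toNat := by omega
    simp [this]

theorem pv_ite_bxor (a b : Int) :
    (if PySem.Int.bxor a b ≠ 0 then (1 : Int) else 0) = pvInd a b := by
  by_cases h : a = b
  · subst h; simp [pvInd]
  · have : PySem.Int.bxor a b ≠ 0 := fun hc => h ((pv_bxor_eq_zero a b).mp hc)
    simp [pvInd, this, h]

theorem pv_foldl_ite {α : Type} (l : List α) (p : α → Prop) [DecidablePred p] (init : Int) :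
    l.foldl (fun s a => if p a then s + 1 else s) init
      = init + (l.map (fun a => if p a then (1 : Int) else 0)).sum := by
  induction l generalizing init with
  | nil => simp
  | cons x t ih => by_cases h : p x <;> simp [h, ih, add_assoc]

theorem pv_sum_range (n : Nat) (f : Nat → Int) :
    ((List.range n).map f).sum = ∑ i ∈ Finset.range n, f i := by
  induction n with
  | zero => simp
  | succ m ih => rw [List.range_succ, Finset.sum_range_succ]; simp [ih]

theorem pv_cast_succ_sub (a : Nat) : ((a + 1 : Nat) : Int) - 1 = (a : Int) := by push_cast; ring
theorem pv_cast_add_one (a : Nat) : (1 : Int) + (a : Int) = ((a + 1 : Nat) : Int) := by push_cast; ring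

theorem pv_cell_cast (arr : List (List (List Int))) (z y x : Nat) :
    pvCell arr (z : Int) (y : Int) (x : Int) = pvE arr z y x := by
  simp [pvCell, pvE, PySem.List.pyGetD_natCast]

-- A's three scans, written as sums of change indicators
theorem pvA_eq (arr : List (List (List Int))) (max_val : Int) :
    get_surface_area arr max_val
      = ((∑ z ∈ Finset.range (max_val + 1).toNat, ∑ y ∈ Finset.range (max_val + 1).toNat,
            ∑ j ∈ Finset.range max_val.toNat, pvInd (pvE arr z y (j + 1)) (pvE arr z y j))
        + (∑ z ∈ Finset.range (max_val + 1).toNat, ∑ x ∈ Finset.range (max_val + 1).toNat,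
            ∑ j ∈ Finset.range max_val.toNat, pvInd (pvE arr z (j + 1) x) (pvE arr z j x)))
        + (∑ y ∈ Finset.range (max_val + 1).toNat, ∑ x ∈ Finset.range (max_val + 1).toNat,
            ∑ j ∈ Finset.range max_val.toNat, pvInd (pvE arr (j + 1) y x) (pvE arr j y x)) := by
  unfold get_surface_area
  rw [PySem.List.pyRange_one 0 (max_val + 1), PySem.List.pyRange_one 1 (max_val + 1)]
  simp only [List.foldl_map, pv_foldl_ite, PySem.List.foldl_add, zero_add, sub_zero,
    add_sub_cancel_right, pv_sum_range, pv_cast_add_one, pv_cast_succ_sub, pv_cell_cast,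
    pv_ite_bxor]

-- the zip-transpose of a rectangular list of lists, column by column
theorem pvZipNAux_rect {α : Type} [Inhabited α] (n : Nat) (ls : List (List α))
    (h : ∀ l ∈ ls, l.length = n) :
    pvZipNAux n ls = (List.range n).map (fun j => ls.map (fun l => l.getD j default)) := by
  induction n generalizing ls with
  | zero => simp [pvZipNAux]
  | succ m ih =>
    have hne : ¬ (ls.any (·.isEmpty) = true) := by
      simp only [List.any_eq_true]
      rintro ⟨l, hl, he⟩
      have hlen := h l hl
      rw [List.isEmpty_iff] at he
      subst he; simp at hlen
    rw [pvZipNAux, if_neg hne, ih (ls.map (·.tail))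
      (by intro l' hl'; simp only [List.mem_map] at hl'
          obtain ⟨l, hl, rfl⟩ := hl'
          have := h l hl
          simp [List.length_tail, this])]
    rw [List.range_succ_eq_map]
    simp only [List.map_cons, List.map_map, Function.comp_def]
    refine congrArg₂ List.cons ?_ ?_
    · refine List.map_congr_left fun l hl => ?_
      cases l with
      | nil => have := h _ hl; simp at this
      | cons a t => rfl
    · refine List.map_congr_left fun j _ => ?_
      refine List.map_congr_left fun l hl => ?_
      cases l with
      | nil => have := h _ hl; simp at this
      | cons a t => rfl

theorem pvZipN_rect {α : Type} [Inhabited α] (n : Nat) (ls : List (List α)) (hne : ls ≠ [])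
    (h : ∀ l ∈ ls, l.length = n) :
    pvZipN ls = (List.range n).map (fun j => ls.map (fun l => l.getD j default)) := by
  match ls, hne with
  | l :: t, _ =>
    show pvZipNAux l.length (l :: t) = _
    rw [h l (List.mem_cons_self ..)]
    exact pvZipNAux_rect n (l :: t) h

theorem pvZipN_range {α : Type} [Inhabited α] (n : Nat) (hn : 0 < n) (g : Nat → Nat → α) :
    pvZipN ((List.range n).map (fun i => (List.range n).map (fun j => g i j)))
      = (List.range n).map (fun j => (List.range n).map (fun i => g i j)) := by
  rw [pvZipN_rect n _ (by simp [List.range_eq_nil]; omega)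
    (by intro l hl; simp only [List.mem_map] at hl; obtain ⟨i, _, rfl⟩ := hl; simp)]
  refine List.map_congr_left fun j hj => ?_
  rw [List.map_map]
  refine List.map_congr_left fun i hi => ?_
  simp only [List.mem_range] at hj hi
  exact PySem.List.getD_map_range _ n j default hj

-- transitions(line) = number of value changes along the line
theorem pv_compress_len (line : List Int) : ∀ (acc : List Int) (p : Int), acc.getLast? = some p →
    (((line.foldl (fun runs v => if runs.isEmpty ∨ runs.getLast? ≠ some v then runs ++ [v] else runs) acc).length : Int))
      = acc.length + pvCnt p line := by
  induction line with
  | nil => intro acc p h; simp [pvCnt]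
  | cons v t ih =>
    intro acc p h
    have hacc : acc.isEmpty = false := by
      cases acc with
      | nil => simp at h
      | cons a b => rfl
    by_cases hvp : v = p
    · subst hvp
      rw [List.foldl_cons, if_neg (by simp [hacc, h]), ih acc v h]
      simp [pvCnt]
    · rw [List.foldl_cons,
        if_pos (by right; rw [h]; simp only [ne_eq, Option.some.injEq]; exact fun e => hvp e.symm),
        ih (acc ++ [v]) v (by simp)]
      simp [pvCnt, hvp]
      ring

theorem pvTrans_cons (h : Int) (t : List Int) : pvTrans (h :: t) = pvCnt h t := by
  unfold pvTrans pvCompress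
  rw [List.foldl_cons]
  have e : (if (([] : List Int).isEmpty ∨ ([] : List Int).getLast? ≠ some h) then ([] : List Int) ++ [h] else []) = [h] := by simp
  rw [e, pv_compress_len t [h] h (by simp)]
  simp

theorem pvCnt_range_map (f : Nat → Int) : ∀ (k a : Nat),
    pvCnt (f a) ((List.range k).map (fun j => f (a + j + 1)))
      = ∑ j ∈ Finset.range k, pvInd (f (a + j + 1)) (f (a + j)) := by
  intro k
  induction k with
  | zero => intro a; simp [pvCnt]
  | succ m ih =>
    intro a
    rw [List.range_succ_eq_map]
    simp only [List.map_cons, List.map_map, Function.comp_def, Nat.add_zero]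
    simp only [pvCnt]
    rw [show (fun j => f (a + (j + 1) + 1)) = (fun j => f ((a + 1) + j + 1)) from
      funext fun j => congrArg f (by omega)]
    rw [ih (a + 1), Finset.sum_range_succ']
    have hs : ∑ j ∈ Finset.range m, pvInd (f (a + (j + 1) + 1)) (f (a + (j + 1)))
        = ∑ j ∈ Finset.range m, pvInd (f (a + 1 + j + 1)) (f (a + 1 + j)) :=
      Finset.sum_congr rfl fun j _ => by
        rw [show a + (j + 1) + 1 = a + 1 + j + 1 from by omega,
            show a + (j + 1) = a + 1 + j from by omega]
    rw [hs]
    simp only [Nat.add_zero, pvInd]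
    rw [add_comm]

theorem pvTrans_range_map (f : Nat → Int) (m : Nat) :
    pvTrans ((List.range (m + 1)).map f) = ∑ j ∈ Finset.range m, pvInd (f (j + 1)) (f j) := by
  rw [List.range_succ_eq_map]
  simp only [List.map_cons, List.map_map, Function.comp_def]
  rw [pvTrans_cons]
  have h := pvCnt_range_map f m 0
  rw [show (fun j => f (j + 1)) = (fun j => f (0 + j + 1)) from funext fun j => congrArg f (by omega)]
  rw [h]
  exact Finset.sum_congr rfl fun j _ => by
    rw [show 0 + j + 1 = j + 1 from by omega, show 0 + j = j from by omega]

-- the two line-collecting loops of B, as sums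
theorem pv_sum_foldl_plane (ls : List (List (List Int))) : ∀ (init : List (List Int)),
    ((ls.foldl (fun acc plane => (acc ++ plane) ++ pvZipN plane) init).map pvTrans).sum
      = (init.map pvTrans).sum
        + (ls.map (fun plane => (plane.map pvTrans).sum + ((pvZipN plane).map pvTrans).sum)).sum := by
  induction ls with
  | nil => intro init; simp
  | cons p t ih =>
    intro init
    rw [List.foldl_cons, ih]
    simp [List.map_append, List.sum_append]
    ring

theorem pv_sum_foldl_stack (ls : List (List (List Int))) : ∀ (init : List (List Int)),
    ((ls.foldl (fun acc stack => acc ++ pvZipN stack) init).map pvTrans).sum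
      = (init.map pvTrans).sum + (ls.map (fun stack => ((pvZipN stack).map pvTrans).sum)).sum := by
  induction ls with
  | nil => intro init; simp
  | cons p t ih =>
    intro init
    rw [List.foldl_cons, ih]
    simp [List.map_append, List.sum_append]
    ring

theorem pvB_eq (arr : List (List (List Int))) (max_val : Int) (hm : 1 ≤ max_val) :
    get_surface_area_alt arr max_val
      = ((∑ z ∈ Finset.range (max_val + 1).toNat, ∑ y ∈ Finset.range (max_val + 1).toNat,
            ∑ j ∈ Finset.range max_val.toNat, pvInd (pvE arr z y (j + 1)) (pvE arr z y j))
        + (∑ z ∈ Finset.range (max_val + 1).toNat, ∑ x ∈ Finset.range (max_val + 1).toNat,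
            ∑ j ∈ Finset.range max_val.toNat, pvInd (pvE arr z (j + 1) x) (pvE arr z j x)))
        + (∑ y ∈ Finset.range (max_val + 1).toNat, ∑ x ∈ Finset.range (max_val + 1).toNat,
            ∑ j ∈ Finset.range max_val.toNat, pvInd (pvE arr (j + 1) y x) (pvE arr j y x)) := by
  have h0 : ¬ max_val ≤ 0 := by omega
  obtain ⟨m, hm1⟩ : ∃ m, (max_val + 1).toNat = m + 1 := ⟨max_val.toNat, by omega⟩
  have hm2 : max_val.toNat = m := by omega
  have hn : 0 < m + 1 := Nat.succ_pos m
  unfold get_surface_area_alt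
  rw [if_neg h0]
  dsimp only
  rw [PySem.List.pyRange_one 0 (max_val + 1)]
  simp only [sub_zero, zero_add, List.map_map, Function.comp_def, pv_cell_cast, hm1]
  rw [pvZipN_range (m + 1) hn]
  rw [pv_sum_foldl_stack, pv_sum_foldl_plane]
  simp only [List.map_nil, List.sum_nil, zero_add, List.map_map, Function.comp_def]
  simp only [pvZipN_range (m + 1) hn]
  simp only [List.map_map, Function.comp_def, pvTrans_range_map, pv_sum_range]
  rw [hm2]
  rw [Finset.sum_add_distrib]

-- ===== VERDICT (by name: the statement is the Claim_ definition above) =====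
theorem get_surface_area_spec : Claim_equal_get_surface_area := by
  intro arr max_val _hdom hpre
  unfold Spec_get_surface_area
  by_cases hm : max_val ≤ 0
  · rw [pvA_eq]
    have h0 : max_val.toNat = 0 := by omega
    simp [get_surface_area_alt, hm, h0]
  · rcases hpre with h | ⟨ha, hp⟩
    · omega
    · rw [pvA_eq, pvB_eq arr max_val (by omega)]
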